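-- pv_equiv track=rewrite | github.com/urban233/PySSA | pyssa/util/input_validator.py | validate_input_for_project_name
-- ===== SOURCE A (Python) =====
-- def validate_input_for_project_name(the_current_entered_text: str,
--                                     the_current_projects: set) -> tuple[bool, str, str]:
--     """Validates the input for a project name.
--
--     Returns:
--         a boolean indicating if the input is valid
--         a string that contains the stylesheet for the line edit
--         a string that contains a message
--     """
--     allowed_chars = {'0', '1', '2', '3', '4', '5', '6', '7', '8', '9', 'a', 'b', 'c', 'd', 'e', 'f', 'g', 'h', 'i', 'j',
--                      'k', 'l', 'm', 'n', 'o', 'p', 'q', 'r', 's', 't', 'u', 'v', 'w', 'x', 'y', 'z', 'A', 'B', 'C', 'D',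
--                      'E', 'F', 'G', 'H', 'I', 'J', 'K', 'L', 'M', 'N', 'O', 'P', 'Q', 'R', 'S', 'T', 'U', 'V', 'W', 'X',
--                      'Y', 'Z', '-', '_'}
--     for char in the_current_entered_text:
--         if char not in allowed_chars:
--             return False, """QLineEdit {color: #ba1a1a; border-color: #ba1a1a;}""", "Invalid character."
--     if the_current_entered_text in the_current_projects:
--         return False, """QLineEdit {color: #ba1a1a; border-color: #ba1a1a;}""", "Project name already exists!"
--     elif the_current_entered_text == "":
--         return False, """QLineEdit {color: #ba1a1a; border-color: #ba1a1a;}""", "Please enter a project name."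
--     else:
--         return True, """QLineEdit {color: #000000; border-color: #DCDBE3;}""", ""
-- ===== SOURCE B (Python) =====
-- import re
--
-- _VALID_NAME = re.compile(r'[0-9A-Za-z_-]*')
--
-- def validate_input_for_project_name(the_current_entered_text: str,
--                                     the_current_projects: set) -> tuple[bool, str, str]:
--     """Validates the input for a project name (regex-based)."""
--     if _VALID_NAME.fullmatch(the_current_entered_text) is None:
--         return False, """QLineEdit {color: #ba1a1a; border-color: #ba1a1a;}""", "Invalid character."
--     if the_current_entered_text in the_current_projects:
--         return False, """QLineEdit {color: #ba1a1a; border-color: #ba1a1a;}""", "Project name already exists!"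
--     if the_current_entered_text == "":
--         return False, """QLineEdit {color: #ba1a1a; border-color: #ba1a1a;}""", "Please enter a project name."
--     return True, """QLineEdit {color: #000000; border-color: #DCDBE3;}""", ""
-- ===== Notes on version B (the rewrite author's own statement) =====
-- stated objective: idiomatic
-- what changed: The explicit per-character loop over a 64-element set literal is replaced by a single precompiled regex fullmatch over the character class [0-9A-Za-z_-]*.
import Mathlib
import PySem

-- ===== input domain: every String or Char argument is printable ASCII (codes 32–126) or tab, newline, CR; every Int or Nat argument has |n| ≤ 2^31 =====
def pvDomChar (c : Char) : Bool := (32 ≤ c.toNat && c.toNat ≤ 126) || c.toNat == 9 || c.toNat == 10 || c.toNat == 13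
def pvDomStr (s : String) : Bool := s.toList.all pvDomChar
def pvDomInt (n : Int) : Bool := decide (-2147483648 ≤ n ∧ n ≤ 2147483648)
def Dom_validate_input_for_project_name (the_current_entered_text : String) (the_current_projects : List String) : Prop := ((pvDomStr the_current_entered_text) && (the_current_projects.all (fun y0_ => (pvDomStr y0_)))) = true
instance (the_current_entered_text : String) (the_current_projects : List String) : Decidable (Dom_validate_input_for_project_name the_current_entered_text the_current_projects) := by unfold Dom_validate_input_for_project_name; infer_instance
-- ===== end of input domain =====

-- B replaces A's explicit per-character scan over a 64-element set literal by a single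
-- regex fullmatch over the class [0-9A-Za-z_-]* (ported as an `all` over range tests); idiomatic, same cost.


-- ===== PORT A =====
-- the set literal `allowed_chars`
def pvAllowedChars : PySem.Set Char := PySem.Set.ofList
  ['0','1','2','3','4','5','6','7','8','9','a','b','c','d','e','f','g','h','i','j',
   'k','l','m','n','o','p','q','r','s','t','u','v','w','x','y','z','A','B','C','D',
   'E','F','G','H','I','J','K','L','M','N','O','P','Q','R','S','T','U','V','W','X',
   'Y','Z','-','_']

-- `for char in ...: if char not in allowed_chars: return ...` — early return on first bad char
def pvScanA : List Char → Option (Bool × String × String)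
  | [] => none
  | c :: rest =>
    if ¬ PySem.Set.contains pvAllowedChars c then
      some (false, "QLineEdit {color: #ba1a1a; border-color: #ba1a1a;}", "Invalid character.")
    else pvScanA rest

def validate_input_for_project_name (the_current_entered_text : String) (the_current_projects : List String) : Bool × String × String :=
  match pvScanA the_current_entered_text.toList with
  | some r => r
  | none =>
    if PySem.Set.contains the_current_projects the_current_entered_text then
      (false, "QLineEdit {color: #ba1a1a; border-color: #ba1a1a;}", "Project name already exists!")
    else if the_current_entered_text == "" then
      (false, "QLineEdit {color: #ba1a1a; border-color: #ba1a1a;}", "Please enter a project name.")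
    else
      (true, "QLineEdit {color: #000000; border-color: #DCDBE3;}", "")

-- ===== PORT B =====
-- re.fullmatch(r'[0-9A-Za-z_-]*', s): exact on this class — every character matches the class
def pvClassB (c : Char) : Bool :=
  ('0' ≤ c && c ≤ '9') || ('A' ≤ c && c ≤ 'Z') || ('a' ≤ c && c ≤ 'z') || c == '_' || c == '-'

def validate_input_for_project_name_alt (the_current_entered_text : String) (the_current_projects : List String) : Bool × String × String :=
  if ¬ the_current_entered_text.toList.all pvClassB then
    (false, "QLineEdit {color: #ba1a1a; border-color: #ba1a1a;}", "Invalid character.")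
  else if PySem.Set.contains the_current_projects the_current_entered_text then
    (false, "QLineEdit {color: #ba1a1a; border-color: #ba1a1a;}", "Project name already exists!")
  else if the_current_entered_text == "" then
    (false, "QLineEdit {color: #ba1a1a; border-color: #ba1a1a;}", "Please enter a project name.")
  else
    (true, "QLineEdit {color: #000000; border-color: #DCDBE3;}", "")

-- ===== PRECONDITION & SPEC =====
def Spec_validate_input_for_project_name (the_current_entered_text : String) (the_current_projects : List String) (out : Bool × String × String) : Prop := out = validate_input_for_project_name_alt the_current_entered_text the_current_projects
instance (the_current_entered_text : String) (the_current_projects : List String) (out : Bool × String × String) : Decidable (Spec_validate_input_for_project_name the_current_entered_text the_current_projects out) := by unfold Spec_validate_input_for_project_name; infer_instance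

-- ===== CLAIM (what is proved, stated in full; the proofs are below) =====
def Claim_equal_validate_input_for_project_name : Prop := ∀ (the_current_entered_text : String) (the_current_projects : List String), Dom_validate_input_for_project_name the_current_entered_text the_current_projects → Spec_validate_input_for_project_name the_current_entered_text the_current_projects (validate_input_for_project_name the_current_entered_text the_current_projects)

-- ===== LEMMAS AND PROOFS =====
set_option maxRecDepth 8192 in
theorem pv_mem_allowed_eq (c : Char) : PySem.Set.contains pvAllowedChars c = pvClassB c := by
  have h : pvAllowedChars = ['0','1','2','3','4','5','6','7','8','9','a','b','c','d','e','f','g','h','i','j',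
   'k','l','m','n','o','p','q','r','s','t','u','v','w','x','y','z','A','B','C','D',
   'E','F','G','H','I','J','K','L','M','N','O','P','Q','R','S','T','U','V','W','X',
   'Y','Z','-','_'] := by decide
  rw [h, Bool.eq_iff_iff]
  simp only [PySem.Set.contains, List.contains_eq_mem, List.mem_cons, List.not_mem_nil, or_false,
    decide_eq_true_eq, pvClassB, Bool.or_eq_true, Bool.and_eq_true, Char.le_def,
    UInt32.le_iff_toNat_le, Char.ext_iff, ← UInt32.toNat_inj, beq_iff_eq, Char.reduceVal, UInt32.reduceToNat]
  omega

theorem pv_scanA_eq (cs : List Char) :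
    pvScanA cs = if cs.all pvClassB then none
      else some (false, "QLineEdit {color: #ba1a1a; border-color: #ba1a1a;}", "Invalid character.") := by
  induction cs with
  | nil => simp [pvScanA]
  | cons c rest ih =>
    simp only [pvScanA, List.all_cons, pv_mem_allowed_eq, ih]
    by_cases h : pvClassB c = true <;> simp [h]

-- ===== VERDICT (by name: the statement is the Claim_ definition above) =====
theorem validate_input_for_project_name_spec : Claim_equal_validate_input_for_project_name := by
  intro s ps _
  unfold Spec_validate_input_for_project_name validate_input_for_project_name validate_input_for_project_name_alt
  rw [pv_scanA_eq]
  by_cases h : s.toList.all pvClassB = true <;> simp [h]
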